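-- pv_equiv track=rewrite | github.com/BaeInpyo/ProgrammingExercise | Chapter11_CombinationalSearch/Allergy/ygg_allergy.py | getTMinCount
-- ===== SOURCE A (Python) =====
-- def getTMinCount(friends, foods, chosen):
--     count = 0
--     numFriends = len(friends)
--     numChosen = len(chosen)
--     leftFriends = numFriends - numChosen
--     for food in foods:
--         if leftFriends <= 0:
--             break
--         leftFriends -= len(food)
--         count += 1
--     return count
-- ===== SOURCE B (Python) =====
-- def getTMinCount(friends, foods, chosen):
--     left = len(friends) - len(chosen)
--     if left <= 0:
--         return 0
--     # prefix-sum table of food sizes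
--     prefix = []
--     s = 0
--     for food in foods:
--         s += len(food)
--         prefix.append(s)
--     # leftmost binary search for the first prefix sum >= left
--     lo, hi = 0, len(prefix)
--     while lo < hi:
--         mid = (lo + hi) // 2
--         if prefix[mid] < left:
--             lo = mid + 1
--         else:
--             hi = mid
--     return lo + 1 if lo < len(foods) else len(foods)
-- ===== Notes on version B (the rewrite author's own statement) =====
-- stated objective: alternative
-- what changed: Replaces A's early-breaking running-decrement scan with building a prefix-sum table and a leftmost binary search for the first prefix sum covering the remaining friends.
import Mathlib
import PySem

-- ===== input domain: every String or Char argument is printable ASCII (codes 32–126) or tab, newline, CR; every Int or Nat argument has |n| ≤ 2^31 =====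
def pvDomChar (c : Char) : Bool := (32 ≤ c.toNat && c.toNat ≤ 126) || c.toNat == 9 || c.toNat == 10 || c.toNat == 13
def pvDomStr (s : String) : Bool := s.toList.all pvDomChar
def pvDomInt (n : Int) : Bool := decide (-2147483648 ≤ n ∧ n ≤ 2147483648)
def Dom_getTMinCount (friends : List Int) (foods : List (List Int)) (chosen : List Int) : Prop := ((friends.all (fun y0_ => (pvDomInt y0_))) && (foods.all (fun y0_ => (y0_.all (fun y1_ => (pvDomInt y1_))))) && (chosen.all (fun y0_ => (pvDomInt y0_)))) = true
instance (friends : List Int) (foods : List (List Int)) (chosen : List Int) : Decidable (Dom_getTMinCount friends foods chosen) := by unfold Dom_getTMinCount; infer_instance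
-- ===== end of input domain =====

-- B replaces A's early-breaking running-decrement scan by a prefix-sum table plus a
-- leftmost binary search (objective: alternative algorithm, similar cost).

-- ===== PORT A =====
-- the for-loop of A: state (leftFriends, count), break when leftFriends <= 0
def getTMinCountGo : List (List Int) → Int → Int → Int
  | [], _, count => count
  | food :: rest, leftFriends, count =>
    if leftFriends ≤ 0 then count
    else getTMinCountGo rest (leftFriends - (food.length : Int)) (count + 1)

def getTMinCount (friends : List Int) (foods : List (List Int)) (chosen : List Int) : Int :=
  getTMinCountGo foods ((friends.length : Int) - (chosen.length : Int)) 0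

-- ===== PORT B =====
-- the prefix-building loop of Source B: s runs through the partial sums, each appended
def prefixTable : List (List Int) → Int → List Int
  | [], _ => []
  | food :: rest, s => (s + (food.length : Int)) :: prefixTable rest (s + (food.length : Int))

-- the while-loop of Source B: leftmost binary search for the first entry >= target
def bsearchLo (p : List Int) (target : Int) (lo hi : Nat) : Nat :=
  if lo < hi then
    let mid := (lo + hi) / 2
    if p.getD mid 0 < target then bsearchLo p target (mid + 1) hi
    else bsearchLo p target lo mid
  else lo
termination_by hi - lo
decreasing_by all_goals omega

def getTMinCount_alt (friends : List Int) (foods : List (List Int)) (chosen : List Int) : Int :=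
  let left : Int := (friends.length : Int) - (chosen.length : Int)
  if left ≤ 0 then 0
  else
    let pre := prefixTable foods 0
    let lo := bsearchLo pre left 0 pre.length
    if lo < foods.length then (lo : Int) + 1 else (foods.length : Int)

-- ===== PRECONDITION & SPEC =====
def Spec_getTMinCount (friends : List Int) (foods : List (List Int)) (chosen : List Int) (out : Int) : Prop := out = getTMinCount_alt friends foods chosen
instance (friends : List Int) (foods : List (List Int)) (chosen : List Int) (out : Int) : Decidable (Spec_getTMinCount friends foods chosen out) := by unfold Spec_getTMinCount; infer_instance

-- ===== CLAIM (what is proved, stated in full; the proofs are below) =====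
def Claim_equal_getTMinCount : Prop := ∀ (friends : List Int) (foods : List (List Int)) (chosen : List Int), Dom_getTMinCount friends foods chosen → Spec_getTMinCount friends foods chosen (getTMinCount friends foods chosen)

-- ===== LEMMAS AND PROOFS =====

-- the count taken by A's loop, as a function of the remaining-friends value
def cntA : List (List Int) → Int → Int
  | [], _ => 0
  | food :: rest, left => if left ≤ 0 then 0 else 1 + cntA rest (left - (food.length : Int))

-- exclusive prefix sums: the value of leftFriends' subtrahend before each iteration
def prefixE : List (List Int) → Int → List Int
  | [], _ => []
  | food :: rest, s => s :: prefixE rest (s + (food.length : Int))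

def sumLens (l : List (List Int)) : Int := (l.map (fun f => (f.length : Int))).sum

theorem go_eq_cntA : ∀ (l : List (List Int)) (left c : Int),
    getTMinCountGo l left c = c + cntA l left := by
  intro l
  induction l with
  | nil => intro left c; simp [getTMinCountGo, cntA]
  | cons f r ih =>
    intro left c
    simp only [getTMinCountGo, cntA]
    split_ifs with h
    · simp
    · rw [ih]; ring

theorem le_of_mem_prefixE : ∀ (l : List (List Int)) (s x : Int), x ∈ prefixE l s → s ≤ x := by
  intro l
  induction l with
  | nil => intro s x hx; simp [prefixE] at hx
  | cons f r ih =>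
    intro s x hx
    simp only [prefixE, List.mem_cons] at hx
    rcases hx with rfl | hx
    · omega
    · have := ih _ _ hx; omega

theorem le_of_mem_prefixTable : ∀ (l : List (List Int)) (s x : Int), x ∈ prefixTable l s → s ≤ x := by
  intro l
  induction l with
  | nil => intro s x hx; simp [prefixTable] at hx
  | cons f r ih =>
    intro s x hx
    simp only [prefixTable, List.mem_cons] at hx
    rcases hx with rfl | hx
    · omega
    · have := ih _ _ hx; omega

theorem sumLens_nonneg (l : List (List Int)) : 0 ≤ sumLens l := by
  unfold sumLens
  apply List.sum_nonneg
  intro x hx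
  obtain ⟨f, _, rfl⟩ := List.mem_map.1 hx
  exact Int.natCast_nonneg _

theorem mem_prefixTable_le_sum : ∀ (l : List (List Int)) (s x : Int), x ∈ prefixTable l s → x ≤ s + sumLens l := by
  intro l
  induction l with
  | nil => intro s x hx; simp [prefixTable] at hx
  | cons f r ih =>
    intro s x hx
    simp only [prefixTable, List.mem_cons] at hx
    simp only [sumLens, List.map_cons, List.sum_cons]
    rcases hx with rfl | hx
    · have : (0:Int) ≤ sumLens r := sumLens_nonneg r
      simp only [sumLens] at this; omega
    · have := ih _ _ hx; simp only [sumLens] at this; omega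

theorem cons_prefixTable : ∀ (l : List (List Int)) (s : Int),
    s :: prefixTable l s = prefixE l s ++ [s + sumLens l] := by
  intro l
  induction l with
  | nil => intro s; simp [prefixTable, prefixE, sumLens]
  | cons f r ih =>
    intro s
    simp only [prefixTable, prefixE, List.cons_append, List.cons.injEq, true_and]
    rw [ih]
    congr 2
    simp [sumLens]; ring

theorem length_prefixTable : ∀ (l : List (List Int)) (s : Int), (prefixTable l s).length = l.length := by
  intro l
  induction l with
  | nil => intro s; rfl
  | cons f r ih => intro s; simp [prefixTable, ih]

theorem pairwise_prefixTable : ∀ (l : List (List Int)) (s : Int), (prefixTable l s).Pairwise (· ≤ ·) := by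
  intro l
  induction l with
  | nil => intro s; simp [prefixTable]
  | cons f r ih =>
    intro s
    simp only [prefixTable, List.pairwise_cons]
    refine ⟨fun x hx => ?_, ih _⟩
    exact le_of_mem_prefixTable _ _ _ hx

theorem cntA_eq_countP : ∀ (l : List (List Int)) (s t : Int),
    cntA l (t - s) = ((prefixE l s).countP (fun x => decide (x < t)) : Int) := by
  intro l
  induction l with
  | nil => intro s t; simp [cntA, prefixE]
  | cons f r ih =>
    intro s t
    by_cases h : t - s ≤ 0
    · -- t - s ≤ 0 : every entry of prefixE r (s+|f|) is ≥ s+|f| ≥ s ≥ t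
      have h0 : (prefixE r (s + (f.length : Int))).countP (fun x => decide (x < t)) = 0 := by
        rw [List.countP_eq_zero]
        intro x hx
        have := le_of_mem_prefixE _ _ _ hx
        simp only [decide_eq_true_eq]
        omega
      have h1 : decide (s < t) = false := by simp; omega
      simp [cntA, prefixE, h, h0, h1]
    · have h1 : decide (s < t) = true := by simp; omega
      have heq : t - s - (f.length : Int) = t - (s + (f.length : Int)) := by ring
      simp only [cntA, prefixE, List.countP_cons, if_neg h, h1]
      rw [heq, ih]
      push_cast
      ring

theorem countP_eq_of_boundary : ∀ (p : List Int) (t : Int) (r : Nat),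
    r ≤ p.length →
    (∀ i (h : i < p.length), i < r → p[i] < t) →
    (∀ i (h : i < p.length), r ≤ i → ¬ p[i] < t) →
    p.countP (fun x => decide (x < t)) = r := by
  intro p t
  induction p with
  | nil => intro r hr _ _; simp at hr ⊢; omega
  | cons x xs ih =>
    intro r hr hlow hhigh
    cases r with
    | zero =>
      have hx : ¬ x < t := hhigh 0 (by simp) (by omega)
      rw [List.countP_cons]
      have h0 : xs.countP (fun x => decide (x < t)) = 0 := by
        apply ih 0 (by omega)
        · intro i h hi; omega
        · intro i h _; exact hhigh (i+1) (by simpa using Nat.succ_lt_succ h) (by omega)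
      simp [hx, h0]
    | succ r' =>
      have hx : x < t := hlow 0 (by simp) (by omega)
      rw [List.countP_cons]
      have h0 : xs.countP (fun x => decide (x < t)) = r' := by
        apply ih r' (by simpa using hr)
        · intro i h hi; exact hlow (i+1) (by simpa using Nat.succ_lt_succ h) (by omega)
        · intro i h hi; exact hhigh (i+1) (by simpa using Nat.succ_lt_succ h) (by omega)
      simp [hx, h0]

theorem bsearch_boundary (p : List Int) (t : Int)
    (M : ∀ i j (hi : i < p.length) (hj : j < p.length), i ≤ j → p[i] ≤ p[j]) :
    ∀ lo hi, lo ≤ hi → hi ≤ p.length →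
    (∀ i (h : i < p.length), i < lo → p[i] < t) →
    (∀ i (h : i < p.length), hi ≤ i → ¬ p[i] < t) →
    bsearchLo p t lo hi ≤ hi ∧
    (∀ i (h : i < p.length), i < bsearchLo p t lo hi → p[i] < t) ∧
    (∀ i (h : i < p.length), bsearchLo p t lo hi ≤ i → ¬ p[i] < t) := by
  intro lo hi
  fun_induction bsearchLo p t lo hi with
  | case1 lo hi h mid hlt ih =>
    intro _ hhi hlow hhigh
    have hmid : mid = (lo + hi) / 2 := rfl
    have hmlen : mid < p.length := by omega
    have hpm : p[mid] < t := by
      have hg : p.getD mid 0 = p[mid] := List.getD_eq_getElem p 0 hmlen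
      rwa [hg] at hlt
    refine ih (by omega) hhi ?_ hhigh
    intro i hil hi1
    rcases Nat.lt_or_ge i mid with hc | hc
    · exact lt_of_le_of_lt (M i mid hil hmlen (by omega)) hpm
    · have : i = mid := by omega
      subst this; exact hpm
  | case2 lo hi h mid hlt ih =>
    intro hlo hhi hlow hhigh
    have hmid : mid = (lo + hi) / 2 := rfl
    have hmlen : mid < p.length := by omega
    have hpm : ¬ p[mid] < t := by
      have hg : p.getD mid 0 = p[mid] := List.getD_eq_getElem p 0 hmlen
      rwa [hg] at hlt
    have res := ih (by omega) (by omega) hlow ?_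
    · exact ⟨by omega, res.2.1, res.2.2⟩
    · intro i hil hmi hc
      exact hpm (lt_of_le_of_lt (M mid i hmlen hil hmi) hc)
  | case3 lo hi h =>
    intro hlo hhi hlow hhigh
    have : lo = hi := by omega
    subst this
    exact ⟨le_refl _, fun i hil hi1 => hlow i hil hi1, fun i hil hi1 => hhigh i hil hi1⟩

theorem total_mem_prefixTable : ∀ (l : List (List Int)) (s : Int), l ≠ [] →
    (s + sumLens l) ∈ prefixTable l s := by
  intro l
  induction l with
  | nil => intro s h; exact absurd rfl h
  | cons f r ih =>
    intro s _
    simp only [prefixTable, List.mem_cons]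
    rcases Decidable.em (r = []) with rfl | hr
    · left; simp [sumLens]
    · right
      have := ih (s + (f.length : Int)) hr
      have heq : s + sumLens (f :: r) = s + (f.length : Int) + sumLens r := by
        simp [sumLens]; ring
      rw [heq]; exact this

-- final assembly
theorem main_eq (friends : List Int) (foods : List (List Int)) (chosen : List Int) :
    getTMinCount friends foods chosen = getTMinCount_alt friends foods chosen := by
  unfold getTMinCount getTMinCount_alt
  rw [go_eq_cntA]
  simp only [zero_add]
  set left := (friends.length : Int) - (chosen.length : Int) with hleft
  by_cases hl : left ≤ 0
  · rw [if_pos hl]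
    cases foods with
    | nil => simp [cntA]
    | cons f r => simp [cntA, hl]
  · rw [if_neg hl]
    set p := prefixTable foods 0 with hp
    have hpl : p.length = foods.length := length_prefixTable foods 0
    have M : ∀ i j (hi : i < p.length) (hj : j < p.length), i ≤ j → p[i] ≤ p[j] := by
      intro i j hi hj hij
      rcases Nat.lt_or_ge i j with hc | hc
      · exact (List.pairwise_iff_getElem.1 (pairwise_prefixTable foods 0)) i j hi hj hc
      · have : i = j := by omega
        subst this; exact le_refl _
    have hb := bsearch_boundary p left M 0 p.length (Nat.zero_le _) (le_refl _)
      (fun i h hi => absurd hi (by omega))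
      (fun i h hi => absurd h (by omega))
    set r := bsearchLo p left 0 p.length with hr
    have hcI : p.countP (fun x => decide (x < left)) = r :=
      countP_eq_of_boundary p left r hb.1 hb.2.1 hb.2.2
    have hcnt : cntA foods left = ((prefixE foods 0).countP (fun x => decide (x < left)) : Int) := by
      have := cntA_eq_countP foods 0 left
      simpa using this
    have hconsP := cons_prefixTable foods 0
    have heq1 : (((0:Int) :: p).countP (fun x => decide (x < left)))
        = ((prefixE foods 0 ++ [0 + sumLens foods]).countP (fun x => decide (x < left))) := by
      rw [hp, hconsP]
    rw [List.countP_cons, List.countP_append, List.countP_cons, List.countP_nil] at heq1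
    have h0lt : (0:Int) < left := by omega
    by_cases hT : sumLens foods < left
    · -- every prefix sum is below left: A takes all foods, B returns len(foods)
      have hall : p.countP (fun x => decide (x < left)) = p.length := by
        rw [List.countP_eq_length]
        intro x hx
        have := mem_prefixTable_le_sum foods 0 x hx
        simp only [decide_eq_true_eq]
        omega
      have hE : (prefixE foods 0).countP (fun x => decide (x < left)) = p.length := by
        simp [h0lt, hT] at heq1
        omega
      have hrn : r = foods.length := by omega
      rw [if_neg (by omega)]
      rw [hcnt, hE, hpl]
    · -- some prefix sum reaches left: B returns r + 1
      have hne : foods ≠ [] := by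
        intro hnil
        subst hnil
        simp [sumLens] at hT
        omega
      have hmemT := total_mem_prefixTable foods 0 hne
      have hlt : p.countP (fun x => decide (x < left)) < p.length := by
        rcases Nat.lt_or_ge (p.countP (fun x => decide (x < left))) p.length with hc | hc
        · exact hc
        · exfalso
          have hle := List.countP_le_length (l := p) (p := fun x => decide (x < left))
          have : p.countP (fun x => decide (x < left)) = p.length := by omega
          rw [List.countP_eq_length] at this
          have := this _ hmemT
          simp only [decide_eq_true_eq] at this
          omega
      have hE : (prefixE foods 0).countP (fun x => decide (x < left)) = r + 1 := by
        simp [h0lt, hT] at heq1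
        omega
      rw [if_pos (by omega)]
      rw [hcnt, hE]
      push_cast
      ring

-- ===== VERDICT (by name: the statement is the Claim_ definition above) =====
theorem getTMinCount_spec : Claim_equal_getTMinCount := by
  intro friends foods chosen _
  unfold Spec_getTMinCount
  exact main_eq friends foods chosen
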